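-- pv_equiv track=rewrite | github.com/robmcrosby/FelixEngine | OldRepoBackup/Plugins/BlenderScripts/io_export_felix/export_felix.py | deIndexBufferMap
-- ===== SOURCE A (Python) =====
-- def deIndexBufferMap(bufferMap, indexMap):
--     map = dict()
--     for name in bufferMap.keys():
--         map[name] = list()
--     for indices in indexMap:
--         for i in indices:
--             for name in bufferMap.keys():
--                 map[name].append(bufferMap[name][i])
--     return map
-- ===== SOURCE B (Python) =====
-- def deIndexBufferMap(bufferMap, indexMap):
--     # Build a row per flattened index (one value from every buffer), then
--     # transpose the row matrix with zip(*rows) into per-name columns.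
--     names = list(bufferMap)
--     rows = [[bufferMap[n][i] for n in names] for indices in indexMap for i in indices]
--     cols = [list(c) for c in zip(*rows)] or [[] for _ in names]
--     return dict(zip(names, cols))
-- ===== Notes on version B (the rewrite author's own statement) =====
-- stated objective: alternative
-- what changed: B builds a row matrix (one row of all buffers' values per flattened index) and transposes it with zip(*rows) into per-name columns, instead of A's interleaved per-index appends into a pre-seeded dict of lists.
import Mathlib
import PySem

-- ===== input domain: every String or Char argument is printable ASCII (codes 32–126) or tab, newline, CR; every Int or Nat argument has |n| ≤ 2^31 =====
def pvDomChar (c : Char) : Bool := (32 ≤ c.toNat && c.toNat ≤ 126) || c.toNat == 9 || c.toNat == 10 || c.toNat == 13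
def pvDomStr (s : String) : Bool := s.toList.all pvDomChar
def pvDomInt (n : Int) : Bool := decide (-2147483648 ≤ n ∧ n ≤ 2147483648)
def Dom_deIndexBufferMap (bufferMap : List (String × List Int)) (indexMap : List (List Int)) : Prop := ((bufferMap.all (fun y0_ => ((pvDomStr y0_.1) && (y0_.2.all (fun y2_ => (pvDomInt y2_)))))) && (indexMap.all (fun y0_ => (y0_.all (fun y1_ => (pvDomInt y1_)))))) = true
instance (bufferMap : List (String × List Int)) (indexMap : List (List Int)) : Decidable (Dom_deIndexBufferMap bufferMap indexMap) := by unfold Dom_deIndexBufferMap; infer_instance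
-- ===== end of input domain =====

-- B builds the row matrix (one row per flattened index) and transposes it with zip(*rows)
-- into per-name columns, instead of A's interleaved per-index appends into a pre-seeded dict.

-- ===== PORT A =====
-- map[name].append(v): append v to the list stored under `name` (keys are unique under Pre_)
def pvAppendAt (m : List (String × List Int)) (name : String) (v : Int) : List (String × List Int) :=
  m.map (fun p => if p.1 = name then (p.1, p.2 ++ [v]) else p)

def deIndexBufferMap (bufferMap : List (String × List Int)) (indexMap : List (List Int)) : List (String × List Int) :=
  -- map = dict(); for name in bufferMap.keys(): map[name] = list()   (fresh distinct keys append in order)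
  let m0 := bufferMap.foldl (fun m p => m ++ [(p.1, ([] : List Int))]) []
  -- for indices in indexMap: for i in indices: for name in bufferMap.keys(): map[name].append(bufferMap[name][i])
  -- (bufferMap[name] is the pair's own value: keys are unique under Pre_, so first-match lookup gives p.2)
  indexMap.foldl (fun m indices =>
    indices.foldl (fun m i =>
      bufferMap.foldl (fun m p => pvAppendAt m p.1 (PySem.List.pyGetD p.2 i 0)) m) m) m0

-- ===== PORT B =====
-- zip(*rows) of Source B: exact here because B's rows are rectangular by construction
-- (every row has length = number of buffers), so truncation-to-shortest never differs.
def pvZipAux : List Int → List (List Int) → List (List Int)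
  | [], _ => []
  | x :: xs, rest => (x :: rest.map List.headI) :: pvZipAux xs (rest.map List.tail)

def deIndexBufferMap_alt (bufferMap : List (String × List Int)) (indexMap : List (List Int)) : List (String × List Int) :=
  -- names = list(bufferMap)
  let names := bufferMap.map Prod.fst
  -- rows = [[bufferMap[n][i] for n in names] for indices in indexMap for i in indices]
  -- (bufferMap[n] is the pair's own value: keys are unique under Pre_, so first-match lookup gives p.2)
  let rows := indexMap.flatMap (fun idxs => idxs.map (fun i => bufferMap.map (fun p => PySem.List.pyGetD p.2 i 0)))
  -- cols = [list(c) for c in zip(*rows)] or [[] for _ in names]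
  let cols0 := match rows with
    | [] => []
    | r :: rest => pvZipAux r rest
  let cols := if cols0.isEmpty then names.map (fun _ => ([] : List Int)) else cols0
  -- dict(zip(names, cols))  (names are distinct under Pre_)
  names.zip cols

-- ===== PRECONDITION & SPEC =====
-- bufferMap is a Python dict, so its keys are distinct; every index must be a valid Python index
-- into every buffer (A raises IndexError otherwise, only when bufferMap is nonempty — when it is
-- empty the inner name loop never runs, which the vacuous ∀ over bufferMap captures).
def Pre_deIndexBufferMap (bufferMap : List (String × List Int)) (indexMap : List (List Int)) : Prop :=
  (bufferMap.map Prod.fst).Nodup ∧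
  ∀ p ∈ bufferMap, ∀ idxs ∈ indexMap, ∀ i ∈ idxs, PySem.Raise.InRange p.2.length i
instance (bufferMap : List (String × List Int)) (indexMap : List (List Int)) : Decidable (Pre_deIndexBufferMap bufferMap indexMap) := by unfold Pre_deIndexBufferMap; infer_instance

def pvWitness_deIndexBufferMap : (List (String × List Int)) × List (List Int) :=
  ([("pos", [10, 20, 30]), ("nrm", [7, 8, 9])], [[0, 2], [1], [-1]])

def Spec_deIndexBufferMap (bufferMap : List (String × List Int)) (indexMap : List (List Int)) (out : List (String × List Int)) : Prop := out = deIndexBufferMap_alt bufferMap indexMap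
instance (bufferMap : List (String × List Int)) (indexMap : List (List Int)) (out : List (String × List Int)) : Decidable (Spec_deIndexBufferMap bufferMap indexMap out) := by unfold Spec_deIndexBufferMap; infer_instance

-- ===== CLAIM (what is proved, stated in full; the proofs are below) =====
def Claim_equal_deIndexBufferMap : Prop := ∀ (bufferMap : List (String × List Int)) (indexMap : List (List Int)), Dom_deIndexBufferMap bufferMap indexMap → Pre_deIndexBufferMap bufferMap indexMap → Spec_deIndexBufferMap bufferMap indexMap (deIndexBufferMap bufferMap indexMap)

-- ===== LEMMAS AND PROOFS =====

lemma pvAppendAt_not_mem (m : List (String × List Int)) (name : String) (v : Int)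
    (h : name ∉ m.map Prod.fst) : pvAppendAt m name v = m := by
  unfold pvAppendAt
  conv_rhs => rw [← List.map_id m]
  apply List.map_congr_left
  intro p hp
  have hne : p.1 ≠ name := by
    intro e
    exact h (e ▸ List.mem_map_of_mem hp)
  simp [hne]

lemma pvAppendAt_append (a b : List (String × List Int)) (name : String) (v : Int) :
    pvAppendAt (a ++ b) name v = pvAppendAt a name v ++ pvAppendAt b name v := by
  simp [pvAppendAt]

lemma pvAppendAt_cons_self (l : List Int) (rest : List (String × List Int)) (name : String) (v : Int) :
    pvAppendAt ((name, l) :: rest) name v = (name, l ++ [v]) :: pvAppendAt rest name v := by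
  simp [pvAppendAt]

-- the inner `for name in bufferMap.keys()` pass appends g p to every entry, given distinct names
lemma pv_inner_loop (f : (String × List Int) → List Int) (g : (String × List Int) → Int) :
    ∀ (todo done : List (String × List Int)),
    (∀ p ∈ todo, p.1 ∉ done.map Prod.fst) → (todo.map Prod.fst).Nodup →
    todo.foldl (fun m p => pvAppendAt m p.1 (g p)) (done ++ todo.map (fun p => (p.1, f p)))
      = done ++ todo.map (fun p => (p.1, f p ++ [g p])) := by
  intro todo
  induction todo with
  | nil => simp
  | cons p rest ih =>
    intro done h1 h2
    simp only [List.map_cons, List.nodup_cons] at h2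
    have hrestmem : p.1 ∉ (rest.map (fun q => (q.1, f q))).map Prod.fst := by
      simpa [List.map_map, Function.comp] using h2.1
    have hstep : pvAppendAt (done ++ (p.1, f p) :: rest.map (fun q => (q.1, f q))) p.1 (g p)
        = (done ++ [(p.1, f p ++ [g p])]) ++ rest.map (fun q => (q.1, f q)) := by
      rw [pvAppendAt_append, pvAppendAt_cons_self,
        pvAppendAt_not_mem done p.1 (g p) (h1 p (by simp)),
        pvAppendAt_not_mem _ p.1 (g p) hrestmem]
      simp
    simp only [List.map_cons, List.foldl_cons]
    rw [hstep, ih (done ++ [(p.1, f p ++ [g p])])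
      (by
        intro q hq hmem
        simp only [List.map_append, List.mem_append, List.map_cons, List.map_nil,
          List.mem_singleton] at hmem
        rcases hmem with h | h
        · exact h1 q (by simp [hq]) h
        · exact h2.1 (h ▸ List.mem_map_of_mem hq))
      h2.2]
    simp

-- shape of A's dict after consuming a flat list of indices
lemma pv_flat_loop (bufferMap : List (String × List Int))
    (hnd : (bufferMap.map Prod.fst).Nodup) :
    ∀ (rest l : List Int),
    rest.foldl (fun m i =>
        bufferMap.foldl (fun m p => pvAppendAt m p.1 (PySem.List.pyGetD p.2 i 0)) m)
      (bufferMap.map (fun p => (p.1, l.map (fun i => PySem.List.pyGetD p.2 i 0))))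
    = bufferMap.map (fun p => (p.1, (l ++ rest).map (fun i => PySem.List.pyGetD p.2 i 0))) := by
  intro rest
  induction rest with
  | nil => simp
  | cons i tl ih =>
    intro l
    simp only [List.foldl_cons]
    have hstep := pv_inner_loop (fun p => l.map (fun j => PySem.List.pyGetD p.2 j 0))
        (fun p => PySem.List.pyGetD p.2 i 0) bufferMap [] (by simp) hnd
    simp only [List.nil_append] at hstep
    rw [hstep]
    have htail := ih (l ++ [i])
    simp only [List.map_append, List.map_cons, List.map_nil] at htail ⊢
    simpa using htail

-- A's result in closed form: the gather map
lemma pv_A_closed (bufferMap : List (String × List Int)) (indexMap : List (List Int))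
    (hnd : (bufferMap.map Prod.fst).Nodup) :
    deIndexBufferMap bufferMap indexMap
      = bufferMap.map (fun p => (p.1, indexMap.flatten.map (fun i => PySem.List.pyGetD p.2 i 0))) := by
  simp only [deIndexBufferMap]
  rw [PySem.List.foldl_append_singleton_eq_map (fun p => (p.1, ([] : List Int))) bufferMap [],
    List.nil_append, ← List.foldl_flatten]
  have h := pv_flat_loop bufferMap hnd indexMap.flatten []
  simpa using h

-- transposing a rectangular map-built matrix yields one column per buffer entry
lemma pvZipAux_rect {α : Type} (g : Int → α → Int) (flat' : List Int) :
    ∀ (bm : List α) (f0 : α → Int),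
    pvZipAux (bm.map f0) (flat'.map (fun i => bm.map (fun p => g i p)))
      = bm.map (fun p => f0 p :: flat'.map (fun i => g i p)) := by
  intro bm
  induction bm with
  | nil => intro f0; simp [pvZipAux]
  | cons p bs ih =>
    intro f0
    simp only [List.map_cons, pvZipAux, List.map_map]
    have h1 : List.map (List.headI ∘ fun i => g i p :: List.map (fun q => g i q) bs) flat'
        = List.map (fun i => g i p) flat' := by simp [Function.comp]
    have h2 : List.map (List.tail ∘ fun i => g i p :: List.map (fun q => g i q) bs) flat'
        = List.map (fun i => List.map (fun q => g i q) bs) flat' := by simp [Function.comp]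
    rw [h1, h2, ih]

lemma pv_zip_star (g : Int → (String × List Int) → Int) (flat : List Int)
    (bm : List (String × List Int)) :
    (match flat.map (fun i => bm.map (fun p => g i p)) with
      | [] => ([] : List (List Int))
      | r :: rest => pvZipAux r rest)
      = (if flat = [] ∨ bm = [] then [] else bm.map (fun p => flat.map (fun i => g i p))) := by
  cases flat with
  | nil => simp
  | cons i0 flat' =>
    simp only [List.map_cons]
    rw [pvZipAux_rect g flat' bm (fun p => g i0 p)]
    by_cases hbm : bm = []
    · simp [hbm]
    · simp [hbm]

-- ===== VERDICT (by name: the statement is the Claim_ definition above) =====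
theorem deIndexBufferMap_spec : Claim_equal_deIndexBufferMap := by
  intro bm im _ hpre
  show deIndexBufferMap bm im = deIndexBufferMap_alt bm im
  rw [pv_A_closed bm im hpre.1]
  simp only [deIndexBufferMap_alt]
  have hrows : im.flatMap (fun idxs => idxs.map (fun i => bm.map (fun p => PySem.List.pyGetD p.2 i 0)))
      = im.flatten.map (fun i => bm.map (fun p => PySem.List.pyGetD p.2 i 0)) := by
    simp [List.flatMap_def, List.map_flatten]
  rw [hrows, pv_zip_star (fun i p => PySem.List.pyGetD p.2 i 0) im.flatten bm]
  by_cases hf : im.flatten = []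
  · simp [hf, List.zip_map']
  · by_cases hbm : bm = []
    · simp [hbm]
    · simp [hf, hbm, List.zip_map']
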